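-- pv_equiv track=rewrite | github.com/ystone17/improve_algorithm | sehwanzzang/level1/6_recommend_a_new_ID.py | check_dot
-- ===== SOURCE A (Python) =====
-- def check_dot(new_id: str) -> bool:
--     if new_id[0] == '.' or new_id[-1] == '.':
--         return False
--     for idx in range(len(new_id)):
--         if idx == 0:
--             continue
--         if new_id[idx] == '.' and new_id[idx - 1] == '.':
--             return False
--     return True
-- ===== SOURCE B (Python) =====
-- def check_dot(new_id: str) -> bool:
--     # Split on dots: the id is valid iff every resulting field is nonempty
--     # (an empty first/last field = leading/trailing dot, an empty middle field = consecutive dots).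
--     return all(new_id.split('.'))
-- ===== Notes on version B (the rewrite author's own statement) =====
-- stated objective: idiomatic
-- what changed: Replaces A's guarded index loop comparing each character to its predecessor with splitting the id on '.' and requiring every resulting field to be nonempty (all(new_id.split('.'))).
import Mathlib
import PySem

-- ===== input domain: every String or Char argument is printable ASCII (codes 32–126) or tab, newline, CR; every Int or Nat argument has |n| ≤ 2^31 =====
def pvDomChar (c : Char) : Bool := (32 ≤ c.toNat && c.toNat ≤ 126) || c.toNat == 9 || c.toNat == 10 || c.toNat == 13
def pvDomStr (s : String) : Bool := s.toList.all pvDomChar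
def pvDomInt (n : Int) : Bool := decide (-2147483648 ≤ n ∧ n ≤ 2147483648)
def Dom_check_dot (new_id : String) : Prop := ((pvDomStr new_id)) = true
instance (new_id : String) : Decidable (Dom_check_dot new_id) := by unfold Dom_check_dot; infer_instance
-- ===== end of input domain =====

-- B validates by a different decomposition: split the id on '.' and require every
-- resulting field to be nonempty, instead of A's guarded index loop over predecessors (idiomatic; measured faster).


-- ===== PORT A =====
-- the 'for idx in range(len(new_id))' loop with its two ifs and early 'return False'
def checkDotLoopA (cs : List Char) : List Int → Bool
  | [] => true
  | idx :: rest =>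
    if idx = 0 then checkDotLoopA cs rest
    else if PySem.List.pyGetD cs idx ' ' = '.' ∧ PySem.List.pyGetD cs (idx - 1) ' ' = '.' then false
    else checkDotLoopA cs rest

def check_dot (new_id : String) : Bool :=
  match PySem.Str.pyGet? new_id 0, PySem.Str.pyGet? new_id (-1) with
  | some c0, some cl =>
    if c0 = '.' ∨ cl = '.' then false
    else checkDotLoopA new_id.toList (PySem.List.pyRange 0 new_id.toList.length 1)
  | _, _ => false  -- IndexError on the empty string; excluded by Pre_check_dot

-- ===== PORT B =====
-- Source B: all(new_id.split('.')); split('.') → PySem.Chars.splitOn on the code points (exact),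
-- all(list of str) → every field nonempty
def check_dot_alt (new_id : String) : Bool :=
  (PySem.Chars.splitOn new_id.toList ['.']).all (fun p => !p.isEmpty)

-- ===== PRECONDITION & SPEC =====
-- Pre_ excludes exactly the empty string, on which A raises IndexError at new_id[0].
def Pre_check_dot (new_id : String) : Prop := new_id.toList ≠ []
instance (new_id : String) : Decidable (Pre_check_dot new_id) := by unfold Pre_check_dot; infer_instance
def pvWitness_check_dot : String := "a.b"

def Spec_check_dot (new_id : String) (out : Bool) : Prop := out = check_dot_alt new_id
instance (new_id : String) (out : Bool) : Decidable (Spec_check_dot new_id out) := by unfold Spec_check_dot; infer_instance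

-- ===== CLAIM (what is proved, stated in full; the proofs are below) =====
def Claim_equal_check_dot : Prop := ∀ (new_id : String), Dom_check_dot new_id → Pre_check_dot new_id → Spec_check_dot new_id (check_dot new_id)

-- ===== LEMMAS AND PROOFS =====

-- simple structural recursion computing split-on-one-dot with the current field accumulated reversed
def splitAuxD (cur : List Char) : List Char → List (List Char)
  | [] => [cur.reverse]
  | c :: rest => if c = '.' then cur.reverse :: splitAuxD [] rest else splitAuxD (c :: cur) rest

-- PySem's fuelled splitOn.go, with enough fuel and sep = ['.'], is splitAuxD
theorem splitOn_go_eq (fuel : Nat) (l cur : List Char) (acc : List (List Char))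
    (h : l.length ≤ fuel) :
    PySem.Chars.splitOn.go ['.'] fuel l cur acc = acc.reverse ++ splitAuxD cur l := by
  induction fuel generalizing l cur acc with
  | zero =>
    have : l = [] := List.length_eq_zero_iff.mp (Nat.le_zero.mp h)
    subst this
    simp [PySem.Chars.splitOn.go, splitAuxD]
  | succ n ih =>
    cases l with
    | nil => simp [PySem.Chars.splitOn.go, splitAuxD]
    | cons c rest =>
      simp only [PySem.Chars.splitOn.go]
      by_cases hc : c = '.'
      · subst hc
        have hp : List.isPrefixOf ['.'] ('.' :: rest) = true := by
          simp [List.isPrefixOf]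
        simp only [hp, if_true, List.length_nil, List.length_cons, Nat.zero_add,
          List.drop_succ_cons, List.drop_zero]
        rw [ih rest [] (cur.reverse :: acc) (by simp at h; omega)]
        simp [splitAuxD]
      · have hp : List.isPrefixOf ['.'] (c :: rest) = false := by
          simp only [List.isPrefixOf, Bool.and_eq_false_iff]
          left
          simp [beq_eq_false_iff_ne]
          exact fun h => hc h.symm
        simp only [hp, Bool.false_eq_true, if_false]
        rw [ih rest (c :: cur) acc (by simp at h; omega)]
        simp [splitAuxD, hc]

theorem splitOn_eq_aux (l : List Char) :
    PySem.Chars.splitOn l ['.'] = splitAuxD [] l := by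
  unfold PySem.Chars.splitOn
  simpa using splitOn_go_eq (l.length + 1) l [] [] (by omega)

-- boolean 'all fields nonempty' as a Prop
theorem all_ne_iff (ls : List (List Char)) :
    (ls.all (fun p => !p.isEmpty) = true) ↔ ∀ p ∈ ls, p ≠ [] := by
  simp [List.all_eq_true]

-- every field of splitAuxD cur l is nonempty ↔ the usual no-dot conditions
theorem splitAuxD_all_ne (l : List Char) : ∀ (cur : List Char),
    (∀ p ∈ splitAuxD cur l, p ≠ []) ↔
    ((cur ≠ [] ∨ (l.head? ≠ some '.' ∧ l ≠ [])) ∧ ¬ (['.', '.'] <:+: l) ∧ l.getLast? ≠ some '.') := by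
  induction l with
  | nil =>
    intro cur
    simp [splitAuxD]
  | cons c rest ih =>
    intro cur
    by_cases hc : c = '.'
    · subst hc
      have hstep : splitAuxD cur ('.' :: rest) = cur.reverse :: splitAuxD [] rest := by
        simp [splitAuxD]
      rw [hstep, List.forall_mem_cons, ih []]
      constructor
      · rintro ⟨hcur, hh | ⟨hh, hne⟩, hinf, hlast⟩
        · exact absurd rfl hh
        · refine ⟨Or.inl (by simpa using hcur), ?_, ?_⟩
          · rw [List.infix_cons_iff]
            rintro (hpre | hinf')
            · cases rest with
              | nil => simp at hpre
              | cons d rs =>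
                rw [List.cons_prefix_cons, List.cons_prefix_cons] at hpre
                exact hh (by simp [← hpre.2.1])
            · exact hinf hinf'
          · cases rest with
            | nil => exact absurd rfl hne
            | cons d rs => simpa using hlast
      · rintro ⟨hcur, hinf, hlast⟩
        have hcur' : cur ≠ [] := by
          rcases hcur with h | ⟨h, _⟩
          · exact h
          · exact absurd rfl h
        cases rest with
        | nil => simp at hlast
        | cons d rs =>
          have hd : d ≠ '.' := by
            intro hd
            exact hinf ⟨[], rs, by simp [hd]⟩
          refine ⟨by simpa using hcur', Or.inr ⟨by simpa using hd, by simp⟩,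
            fun h => hinf (List.infix_cons h), by simpa using hlast⟩
    · have hstep : splitAuxD cur (c :: rest) = splitAuxD (c :: cur) rest := by
        simp [splitAuxD, hc]
      rw [hstep, ih (c :: cur)]
      have h1 : (c :: cur : List Char) ≠ [] := by simp
      have h2 : ¬ (['.', '.'] <+: c :: rest) := by
        intro hpre
        rw [List.cons_prefix_cons] at hpre
        exact hc hpre.1.symm
      constructor
      · rintro ⟨_, hinf, hlast⟩
        refine ⟨Or.inr ⟨by simpa using hc, by simp⟩, ?_, ?_⟩
        · rw [List.infix_cons_iff]
          rintro (hpre | hinf')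
          · exact h2 hpre
          · exact hinf hinf'
        · cases rest with
          | nil => simpa using hc
          | cons d rs => simpa using hlast
      · rintro ⟨_, hinf, hlast⟩
        refine ⟨Or.inl h1, fun h => hinf (List.infix_cons h), ?_⟩
        cases rest with
        | nil => simp
        | cons d rs => simpa using hlast

-- no list of length < 2 has ['.','.'] as an infix
theorem no_infix_of_short (l : List Char) (h : l.length < 2) : ¬ (['.', '.'] <:+: l) := by
  intro hinf
  have := hinf.length_le
  simp at this
  omega

-- the loop over range(k, len) decides whether ['.','.'] occurs in cs.drop (k-1)
theorem loopA_eq_infix (cs : List Char) (k : Nat) (hk : 1 ≤ k) :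
    checkDotLoopA cs (PySem.List.pyRange (k : Int) (cs.length : Int) 1)
      = !decide (['.', '.'] <:+: cs.drop (k - 1)) := by
  by_cases hlt : k < cs.length
  · -- peel index k
    rw [PySem.List.pyRange_one_cons (by exact_mod_cast hlt)]
    have hk1 : k - 1 < cs.length := by omega
    have hdrop : cs.drop (k - 1) = cs[k - 1] :: cs.drop k := by
      have hx : k - 1 + 1 = k := by omega
      rw [List.drop_eq_getElem_cons hk1, hx]
    have hdropk : cs.drop k = cs[k] :: cs.drop (k + 1) := List.drop_eq_getElem_cons hlt
    have hget : PySem.List.pyGetD cs (k : Int) ' ' = cs[k] := by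
      rw [PySem.List.pyGetD_natCast]; exact List.getD_eq_getElem cs ' ' hlt
    have hcast : ((k : Int) - 1) = ((k - 1 : Nat) : Int) := by omega
    have hget' : PySem.List.pyGetD cs ((k : Int) - 1) ' ' = cs[k - 1] := by
      rw [hcast, PySem.List.pyGetD_natCast]; exact List.getD_eq_getElem cs ' ' hk1
    have hkz : ¬ ((k : Int) = 0) := by omega
    unfold checkDotLoopA
    rw [if_neg hkz, hget, hget']
    by_cases hpair : cs[k] = '.' ∧ cs[k - 1] = '.'
    · rw [if_pos hpair]
      have : (['.', '.'] <:+: cs.drop (k - 1)) := by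
        rw [hdrop, hdropk, hpair.1, hpair.2]
        exact ⟨[], cs.drop (k + 1), rfl⟩
      simp [this]
    · rw [if_neg hpair]
      have hcast2 : (k : Int) + 1 = ((k + 1 : Nat) : Int) := by omega
      rw [hcast2, loopA_eq_infix cs (k + 1) (by omega)]
      have hsimp : (k + 1) - 1 = k := by omega
      rw [hsimp]
      congr 1
      have hnp : ¬ (['.', '.'] <+: cs[k - 1] :: cs.drop k) := by
        rw [hdropk, List.cons_prefix_cons, List.cons_prefix_cons]
        intro ⟨h1, h2, _⟩
        exact hpair ⟨h2.symm, h1.symm⟩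
      have hiff : (['.', '.'] <:+: cs.drop (k - 1)) ↔ (['.', '.'] <:+: cs.drop k) := by
        rw [hdrop, List.infix_cons_iff]
        simp [hnp]
      exact decide_eq_decide.mpr hiff.symm
  · -- range is empty and the tail is too short for an infix of length 2
    rw [PySem.List.pyRange_one_eq_nil (by exact_mod_cast Nat.le_of_not_lt hlt)]
    unfold checkDotLoopA
    have : ¬ (['.', '.'] <:+: cs.drop (k - 1)) := by
      apply no_infix_of_short
      have := List.length_drop (l := cs) (i := k - 1)
      omega
    simp [this]
termination_by cs.length - k

-- ===== VERDICT (by name: the statement is the Claim_ definition above) =====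
theorem check_dot_spec : Claim_equal_check_dot := by
  intro new_id _ hpre
  unfold Spec_check_dot check_dot check_dot_alt
  rcases hcs : new_id.toList with _ | ⟨c, cs⟩
  · exact absurd hcs hpre
  · have h0 : PySem.Str.pyGet? new_id 0 = some c := by
      simp only [PySem.Str.pyGet?_eq, hcs]
      exact PySem.List.pyGet?_zero_cons _ _
    have h1 : PySem.Str.pyGet? new_id (-1) = some ((c :: cs).getLast (by simp)) := by
      simp only [PySem.Str.pyGet?_eq, hcs, PySem.Chars.pyGet?]
      rw [PySem.List.pyGet?_neg_one]
      exact List.getLast?_eq_some_getLast (by simp)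
    rw [h0, h1, splitOn_eq_aux]
    change (if c = '.' ∨ (c :: cs).getLast (by simp) = '.' then false
      else checkDotLoopA (c :: cs) (PySem.List.pyRange 0 ((c :: cs).length : Int) 1)) = _
    have hlast : (c :: cs).getLast? = some ((c :: cs).getLast (by simp)) :=
      List.getLast?_eq_some_getLast (by simp)
    by_cases hguard : c = '.' ∨ (c :: cs).getLast (by simp) = '.'
    · rw [if_pos hguard]
      symm
      rw [Bool.eq_false_iff]
      intro hall
      rcases (splitAuxD_all_ne (c :: cs) []).mp ((all_ne_iff _).mp hall) with ⟨hhead, _, hl⟩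
      rcases hguard with h | h
      · rcases hhead with h' | ⟨h', _⟩
        · exact h' rfl
        · exact h' (by simp [h])
      · exact hl (by rw [hlast, h])
    · rw [if_neg hguard]
      push Not at hguard
      have hlen : 0 < (c :: cs).length := by simp
      have hr : PySem.List.pyRange 0 ((c :: cs).length : Int) 1
          = (0 : Int) :: PySem.List.pyRange 1 ((c :: cs).length : Int) 1 := by
        simpa using PySem.List.pyRange_one_cons (a := 0) (b := ((c :: cs).length : Int))
          (by exact_mod_cast hlen)
      rw [hr]
      unfold checkDotLoopA
      rw [if_pos rfl]
      have hl := loopA_eq_infix (c :: cs) 1 le_rfl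
      simp only [Nat.cast_one, Nat.sub_self, List.drop_zero] at hl
      rw [hl]
      by_cases hinf : ['.', '.'] <:+: (c :: cs)
      · have hfalse : (splitAuxD [] (c :: cs)).all (fun p => !p.isEmpty) = false := by
          rw [Bool.eq_false_iff]
          intro hall
          exact ((splitAuxD_all_ne (c :: cs) []).mp ((all_ne_iff _).mp hall)).2.1 hinf
        simp [hfalse, hinf]
      · have hall : (splitAuxD [] (c :: cs)).all (fun p => !p.isEmpty) = true := by
          refine (all_ne_iff _).mpr ((splitAuxD_all_ne (c :: cs) []).mpr
            ⟨Or.inr ⟨by simpa using hguard.1, by simp⟩, hinf, ?_⟩)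
          rw [hlast]
          simpa using hguard.2
        rw [hall]
        simp [hinf]
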